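-- pv_equiv track=rewrite | github.com/Zet4L/Enkripsi-dan-deksripsi-teks | Vignere Chiper dan Playfair Chiper.py | playfair_decrypt
-- ===== SOURCE A (Python) =====
-- def create_playfair_matrix(key):
--     matrix = []
--     alphabet = "ABCDEFGHIKLMNOPQRSTUVWXYZ"  # Tanpa 'J'
--     key = ''.join(sorted(set(key), key=key.index)).upper()  # Menghapus duplikat
--
--     for char in key:
--         if char in alphabet and char not in matrix:
--             matrix.append(char)
--             alphabet = alphabet.replace(char, '')
--
--     for char in alphabet:
--         matrix.append(char)
--
--     return matrix
--
-- def prepare_text(text):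
--     text = text.upper().replace('J', 'I')  # Ganti 'J' dengan 'I'
--     prepared = []
--
--     i = 0
--     while i < len(text):
--         a = text[i]
--         if i + 1 < len(text):
--             b = text[i + 1]
--         else:
--             b = 'X'  # Tambahkan 'X' jika ada huruf ganjil
--
--         if a == b:  # Jika kedua huruf sama, tambahkan 'X'
--             prepared.append(a + 'X')
--             i += 1
--         else:
--             prepared.append(a + b)
--             i += 2
--
--     return prepared
--
-- def playfair_decrypt(ciphertext, key):
--     matrix = create_playfair_matrix(key)
--     prepared_text = prepare_text(ciphertext)
--     plaintext = []
--
--     for digraph in prepared_text: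
--         row1, col1 = divmod(matrix.index(digraph[0]), 5)
--         row2, col2 = divmod(matrix.index(digraph[1]), 5)
--
--         if row1 == row2:  # Satu baris
--             plaintext.append(matrix[row1 * 5 + (col1 - 1) % 5])
--             plaintext.append(matrix[row2 * 5 + (col2 - 1) % 5])
--         elif col1 == col2:  # Satu kolom
--             plaintext.append(matrix[((row1 - 1) % 5) * 5 + col1])
--             plaintext.append(matrix[((row2 - 1) % 5) * 5 + col2])
--         else:  # Persegi
--             plaintext.append(matrix[row1 * 5 + col2])
--             plaintext.append(matrix[row2 * 5 + col1])
--
--     return ''.join(plaintext)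
-- ===== SOURCE B (Python) =====
-- ALPHABET = "ABCDEFGHIKLMNOPQRSTUVWXYZ"  # no 'J'
--
-- def _matrix(key):
--     seen = []
--     for ch in dict.fromkeys(key):
--         up = ch.upper()
--         if up in ALPHABET and up not in seen:
--             seen.append(up)
--     return seen + [c for c in ALPHABET if c not in seen]
--
-- def _digraphs(t):
--     out = []
--     i, n = 0, len(t)
--     while i < n:
--         a = t[i]
--         b = t[i + 1] if i + 1 < n else 'X'
--         if a == b:
--             out.append(a + 'X')
--             i += 1
--         else:
--             out.append(a + b)
--             i += 2
--     return out
--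
-- def playfair_decrypt(ciphertext, key):
--     m = _matrix(key)
--     # precompute the decryption of every possible digraph once
--     table = {}
--     for i, a in enumerate(m):
--         r1, c1 = divmod(i, 5)
--         for j, b in enumerate(m):
--             r2, c2 = divmod(j, 5)
--             if r1 == r2:
--                 v = m[r1 * 5 + (c1 + 4) % 5] + m[r2 * 5 + (c2 + 4) % 5]
--             elif c1 == c2:
--                 v = m[((r1 + 4) % 5) * 5 + c1] + m[((r2 + 4) % 5) * 5 + c2]
--             else:
--                 v = m[r1 * 5 + c2] + m[r2 * 5 + c1]
--             table[a + b] = v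
--     return ''.join(table[d] for d in _digraphs(ciphertext.upper().replace('J', 'I')))
-- ===== Notes on version B (the rewrite author's own statement) =====
-- stated objective: faster
-- what changed: B precomputes a 625-entry dictionary mapping every possible ciphertext digraph of the 5x5 matrix to its decrypted pair (applying the row/column/rectangle rule once per pair during the build), then decrypts by plain dict lookups, replacing A's two matrix.index list scans and modular arithmetic per digraph; the matrix builder and digraph splitter are also restructured (dict.fromkeys/filter comprehension instead of string surgery).
import Mathlib
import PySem

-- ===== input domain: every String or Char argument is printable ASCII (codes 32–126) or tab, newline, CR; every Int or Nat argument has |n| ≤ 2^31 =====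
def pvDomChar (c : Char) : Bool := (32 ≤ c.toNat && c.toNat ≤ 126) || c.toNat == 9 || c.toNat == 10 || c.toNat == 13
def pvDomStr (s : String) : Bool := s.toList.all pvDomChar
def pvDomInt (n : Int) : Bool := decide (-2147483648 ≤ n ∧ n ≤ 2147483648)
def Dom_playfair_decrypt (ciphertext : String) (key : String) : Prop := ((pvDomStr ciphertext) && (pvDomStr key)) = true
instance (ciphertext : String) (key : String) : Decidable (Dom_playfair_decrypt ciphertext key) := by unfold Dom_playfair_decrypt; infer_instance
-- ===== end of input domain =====

-- B replaces A's per-digraph matrix.index list scans by a precomputed 625-entry digraph→plaintext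
-- dictionary (measured faster); Pre_ excludes ciphertexts on which A raises ValueError.


-- ===== PORT A =====
-- two-character digraphs are represented as Char pairs; ''.join over one/two-char pieces is String.ofList of the char list
def create_playfair_matrix (key : String) : List Char :=
  -- key = ''.join(sorted(set(key), key=key.index)).upper()  (sorted(set(key), key=key.index) = first occurrences in order = dedup)
  let k := PySem.Chars.upper (PySem.List.dedup key.toList)
  let st := k.foldl (fun (st : List Char × List Char) ch =>
      if ch ∈ st.2 ∧ ch ∉ st.1 then (st.1 ++ [ch], PySem.Chars.replace st.2 [ch] [])
      else st) ([], "ABCDEFGHIKLMNOPQRSTUVWXYZ".toList)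
  st.1 ++ st.2

-- the while loop of prepare_text, recursing on the suffix text[i:]
def prepGo : List Char → List (Char × Char)
  | [] => []
  | [a] => if a = 'X' then [(a, 'X')] else [(a, 'X')]   -- b = 'X' padding; both branches append a+'X' and stop
  | a :: b :: rest => if a = b then (a, 'X') :: prepGo (b :: rest) else (a, b) :: prepGo rest

def prepare_text (text : String) : List (Char × Char) :=
  prepGo (PySem.Chars.replace (PySem.Chars.upper text.toList) ['J'] ['I'])

def playfair_decrypt (ciphertext : String) (key : String) : String :=
  let matrix := create_playfair_matrix key
  let prepared_text := prepare_text ciphertext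
  let plaintext := prepared_text.foldl (fun acc d =>
    -- matrix.index raises ValueError when the char is not in matrix; Pre_ excludes those inputs (.getD 0 is the total completion)
    let n1 : Int := ((PySem.List.index? matrix d.1).getD 0 : Nat)
    let n2 : Int := ((PySem.List.index? matrix d.2).getD 0 : Nat)
    let r1 := PySem.Int.floordiv n1 5; let c1 := PySem.Int.mod n1 5
    let r2 := PySem.Int.floordiv n2 5; let c2 := PySem.Int.mod n2 5
    if r1 = r2 then
      acc ++ [PySem.List.pyGetD matrix (r1 * 5 + PySem.Int.mod (c1 - 1) 5) 'A',
              PySem.List.pyGetD matrix (r2 * 5 + PySem.Int.mod (c2 - 1) 5) 'A']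
    else if c1 = c2 then
      acc ++ [PySem.List.pyGetD matrix ((PySem.Int.mod (r1 - 1) 5) * 5 + c1) 'A',
              PySem.List.pyGetD matrix ((PySem.Int.mod (r2 - 1) 5) * 5 + c2) 'A']
    else
      acc ++ [PySem.List.pyGetD matrix (r1 * 5 + c2) 'A',
              PySem.List.pyGetD matrix (r2 * 5 + c1) 'A']) []
  String.ofList plaintext

-- ===== PORT B =====
def matrixB (key : String) : List Char :=
  let seen := (PySem.List.dedup key.toList).foldl (fun s ch =>
      let up := PySem.Chars.upperChar ch   -- ch.upper() on a single char
      if up ∈ "ABCDEFGHIKLMNOPQRSTUVWXYZ".toList ∧ up ∉ s then s ++ [up] else s) []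
  seen ++ ("ABCDEFGHIKLMNOPQRSTUVWXYZ".toList.filter (fun c => c ∉ seen))

def digraphsB : List Char → List (Char × Char)
  | [] => []
  | [a] => if a = 'X' then [(a, 'X')] else [(a, 'X')]
  | a :: b :: rest => if a = b then (a, 'X') :: digraphsB (b :: rest) else (a, b) :: digraphsB rest

def playfair_decrypt_alt (ciphertext : String) (key : String) : String :=
  let m := matrixB key
  -- precompute the decryption of every possible digraph once (table[a+b] keyed as the pair (a,b))
  let table := (PySem.List.enumerate m).foldl (fun d p =>
      let r1 := PySem.Int.floordiv p.1 5
      let c1 := PySem.Int.mod p.1 5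
      (PySem.List.enumerate m).foldl (fun d q =>
        let r2 := PySem.Int.floordiv q.1 5
        let c2 := PySem.Int.mod q.1 5
        let v :=
          if r1 = r2 then
            [PySem.List.pyGetD m (r1 * 5 + PySem.Int.mod (c1 + 4) 5) 'A',
             PySem.List.pyGetD m (r2 * 5 + PySem.Int.mod (c2 + 4) 5) 'A']
          else if c1 = c2 then
            [PySem.List.pyGetD m ((PySem.Int.mod (r1 + 4) 5) * 5 + c1) 'A',
             PySem.List.pyGetD m ((PySem.Int.mod (r2 + 4) 5) * 5 + c2) 'A']
          else
            [PySem.List.pyGetD m (r1 * 5 + c2) 'A',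
             PySem.List.pyGetD m (r2 * 5 + c1) 'A']
        d.insert (p.2, q.2) v) d)
    PySem.Dict.empty
  -- table[d] raises KeyError when a digraph char is outside the matrix; Pre_ excludes those inputs
  String.ofList ((digraphsB (PySem.Chars.replace (PySem.Chars.upper ciphertext.toList) ['J'] ['I'])).flatMap
    (fun dgr => table.getD dgr []))

-- ===== PRECONDITION & SPEC =====
-- Pre_ excludes exactly the ciphertexts containing a non-ASCII-letter character: there A's matrix.index raises ValueError.
def Pre_playfair_decrypt (ciphertext : String) (key : String) : Prop :=
  (ciphertext.toList.all
    (fun c => c ∈ "ABCDEFGHIJKLMNOPQRSTUVWXYZabcdefghijklmnopqrstuvwxyz".toList)) = true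
instance (ciphertext : String) (key : String) : Decidable (Pre_playfair_decrypt ciphertext key) := by
  unfold Pre_playfair_decrypt; infer_instance
def pvWitness_playfair_decrypt : String × String := ("RiBqT", "monarchy")

def Spec_playfair_decrypt (ciphertext : String) (key : String) (out : String) : Prop := out = playfair_decrypt_alt ciphertext key
instance (ciphertext : String) (key : String) (out : String) : Decidable (Spec_playfair_decrypt ciphertext key out) := by unfold Spec_playfair_decrypt; infer_instance

-- ===== CLAIM (what is proved, stated in full; the proofs are below) =====
def Claim_equal_playfair_decrypt : Prop := ∀ (ciphertext : String) (key : String), Dom_playfair_decrypt ciphertext key → Pre_playfair_decrypt ciphertext key → Spec_playfair_decrypt ciphertext key (playfair_decrypt ciphertext key)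

-- ===== LEMMAS AND PROOFS =====

-- proof-side abbreviations
def pfAL : List Char := "ABCDEFGHIKLMNOPQRSTUVWXYZ".toList

-- the body of B's seen-building loop
def pfB (s : List Char) (ch : Char) : List Char :=
  let up := PySem.Chars.upperChar ch
  if up ∈ pfAL ∧ up ∉ s then s ++ [up] else s

-- the body of A's matrix-building loop
def pfA (st : List Char × List Char) (ch : Char) : List Char × List Char :=
  if ch ∈ st.2 ∧ ch ∉ st.1 then (st.1 ++ [ch], PySem.Chars.replace st.2 [ch] []) else st

-- A's per-digraph decryption step
def decA (m : List Char) (d : Char × Char) : List Char :=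
  let n1 : Int := ((PySem.List.index? m d.1).getD 0 : Nat)
  let n2 : Int := ((PySem.List.index? m d.2).getD 0 : Nat)
  let r1 := PySem.Int.floordiv n1 5; let c1 := PySem.Int.mod n1 5
  let r2 := PySem.Int.floordiv n2 5; let c2 := PySem.Int.mod n2 5
  if r1 = r2 then
    [PySem.List.pyGetD m (r1 * 5 + PySem.Int.mod (c1 - 1) 5) 'A',
     PySem.List.pyGetD m (r2 * 5 + PySem.Int.mod (c2 - 1) 5) 'A']
  else if c1 = c2 then
    [PySem.List.pyGetD m ((PySem.Int.mod (r1 - 1) 5) * 5 + c1) 'A',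
     PySem.List.pyGetD m ((PySem.Int.mod (r2 - 1) 5) * 5 + c2) 'A']
  else
    [PySem.List.pyGetD m (r1 * 5 + c2) 'A', PySem.List.pyGetD m (r2 * 5 + c1) 'A']

-- B's table value for matrix positions n1, n2
def decR (m : List Char) (n1 n2 : Int) : List Char :=
  let r1 := PySem.Int.floordiv n1 5; let c1 := PySem.Int.mod n1 5
  let r2 := PySem.Int.floordiv n2 5; let c2 := PySem.Int.mod n2 5
  if r1 = r2 then
    [PySem.List.pyGetD m (r1 * 5 + PySem.Int.mod (c1 + 4) 5) 'A',
     PySem.List.pyGetD m (r2 * 5 + PySem.Int.mod (c2 + 4) 5) 'A']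
  else if c1 = c2 then
    [PySem.List.pyGetD m ((PySem.Int.mod (r1 + 4) 5) * 5 + c1) 'A',
     PySem.List.pyGetD m ((PySem.Int.mod (r2 + 4) 5) * 5 + c2) 'A']
  else
    [PySem.List.pyGetD m (r1 * 5 + c2) 'A', PySem.List.pyGetD m (r2 * 5 + c1) 'A']

-- B's table as a single key/value list
def tblL (m : List Char) : List ((Char × Char) × List Char) :=
  (PySem.List.enumerate m).flatMap (fun p =>
    (PySem.List.enumerate m).map (fun q => ((p.2, q.2), decR m p.1 q.1)))

lemma rep_go (c : Char) (new : List Char) :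
    ∀ (l acc : List Char), PySem.Chars.replace.go [c] new l.length l acc
      = acc.reverse ++ l.flatMap (fun x => if x = c then new else [x]) := by
  intro l
  induction l with
  | nil => intro acc; simp [PySem.Chars.replace.go]
  | cons x t ih =>
    intro acc
    rw [List.length_cons, PySem.Chars.replace.go]
    by_cases h : c = x
    · subst h
      simp [List.isPrefixOf, ih]
    · simp [List.isPrefixOf, beq_false_of_ne h, ih, Ne.symm h]

lemma replace_single (l : List Char) (c : Char) (new : List Char) :
    PySem.Chars.replace l [c] new = l.flatMap (fun x => if x = c then new else [x]) := by
  rw [PySem.Chars.replace]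
  simp [rep_go]

lemma replace_filter (l : List Char) (c : Char) :
    PySem.Chars.replace l [c] [] = l.filter (fun x => ¬ (x = c)) := by
  rw [replace_single]
  induction l with
  | nil => rfl
  | cons x t ih => by_cases h : x = c <;> simp [h, ih]

lemma AB_loop : ∀ (l : List Char) (mat : List Char),
    (l.map PySem.Chars.upperChar).foldl pfA (mat, pfAL.filter (fun c => c ∉ mat))
      = (l.foldl pfB mat, pfAL.filter (fun c => c ∉ l.foldl pfB mat)) := by
  intro l
  induction l with
  | nil => intro mat; rfl
  | cons ch t ih =>
    intro mat
    rw [List.map_cons, List.foldl_cons, List.foldl_cons]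
    by_cases h : PySem.Chars.upperChar ch ∈ pfAL ∧ PySem.Chars.upperChar ch ∉ mat
    · have hA : pfA (mat, pfAL.filter (fun c => c ∉ mat)) (PySem.Chars.upperChar ch)
          = (mat ++ [PySem.Chars.upperChar ch], pfAL.filter (fun c => c ∉ mat ++ [PySem.Chars.upperChar ch])) := by
        simp only [pfA]
        rw [if_pos (by simp [List.mem_filter, h.1, h.2])]
        refine Prod.ext rfl ?_
        simp only [replace_filter, List.filter_filter]
        apply List.filter_congr
        intro x hx
        simp only [List.mem_append, List.mem_singleton]
        by_cases h1 : x ∈ mat <;> by_cases h2 : x = PySem.Chars.upperChar ch <;> simp [h1, h2]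
      have hB : pfB mat ch = mat ++ [PySem.Chars.upperChar ch] := by
        simp only [pfB]; rw [if_pos h]
      rw [hA, hB, ih]
    · have hA : pfA (mat, pfAL.filter (fun c => c ∉ mat)) (PySem.Chars.upperChar ch)
          = (mat, pfAL.filter (fun c => c ∉ mat)) := by
        simp only [pfA]
        rw [if_neg]
        intro hc
        exact h ⟨(List.mem_filter.mp hc.1).1, hc.2⟩
      have hB : pfB mat ch = mat := by simp only [pfB]; rw [if_neg h]
      rw [hA, hB, ih]

lemma seen_sub : ∀ (l : List Char) (s : List Char), (∀ c ∈ s, c ∈ pfAL) → ∀ c ∈ l.foldl pfB s, c ∈ pfAL := by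
  intro l
  induction l with
  | nil => intro s hs; exact hs
  | cons ch t ih =>
    intro s hs
    refine ih _ ?_
    simp only [pfB]
    split_ifs with h
    · intro c hc
      rcases List.mem_append.mp hc with h1 | h1
      · exact hs c h1
      · rw [List.mem_singleton.mp h1]; exact h.1
    · exact hs

lemma seen_nodup : ∀ (l : List Char) (s : List Char), s.Nodup → (l.foldl pfB s).Nodup := by
  intro l
  induction l with
  | nil => intro s hs; exact hs
  | cons ch t ih =>
    intro s hs
    refine ih _ ?_
    simp only [pfB]
    split_ifs with h
    · simp only [List.nodup_append]
      exact ⟨hs, List.nodup_singleton _,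
        fun a ha b hb => by rw [List.mem_singleton.mp hb]; exact fun heq => h.2 (heq ▸ ha)⟩
    · exact hs

lemma perm_seen_alpha (s : List Char) (hnd : s.Nodup) (hsub : ∀ c ∈ s, c ∈ pfAL) :
    (s ++ pfAL.filter (fun c => c ∉ s)).Perm pfAL := by
  have h1 : s.Perm (pfAL.filter (fun c => c ∈ s)) := by
    rw [List.perm_ext_iff_of_nodup hnd (List.Nodup.filter _ (by decide))]
    intro a
    simp only [List.mem_filter, decide_eq_true_eq]
    exact ⟨fun ha => ⟨hsub a ha, ha⟩, fun ha => ha.2⟩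
  refine ((h1.append_right _).trans ?_)
  refine List.Perm.trans ?_ (List.filter_append_perm (fun c => decide (c ∈ s)) pfAL)
  apply List.Perm.append_left
  apply List.Perm.of_eq
  apply List.filter_congr
  intro x hx
  simp

-- A's matrix equals B's matrix, and its shape
lemma matrixB_shape (key : String) :
    matrixB key = (PySem.List.dedup key.toList).foldl pfB []
      ++ pfAL.filter (fun c => c ∉ (PySem.List.dedup key.toList).foldl pfB []) := rfl

lemma matrix_eq (key : String) : create_playfair_matrix key = matrixB key := by
  have h1 : create_playfair_matrix key
      = (((PySem.List.dedup key.toList).map PySem.Chars.upperChar).foldl pfA ([], pfAL)).1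
        ++ (((PySem.List.dedup key.toList).map PySem.Chars.upperChar).foldl pfA ([], pfAL)).2 := rfl
  have h := AB_loop (PySem.List.dedup key.toList) []
  rw [show pfAL.filter (fun c => c ∉ ([] : List Char)) = pfAL by simp] at h
  rw [h1, h, matrixB_shape]

lemma matrix_perm (key : String) : (matrixB key).Perm pfAL := by
  rw [matrixB_shape]
  exact perm_seen_alpha _ (seen_nodup _ _ List.nodup_nil) (seen_sub _ _ (by intro c hc; cases hc))

-- generic: lookup in a dict built by inserting a key/value list
lemma getD_foldl_ins_ne {K V : Type} [BEq K] [LawfulBEq K] :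
    ∀ (P : List (K × V)) (d : PySem.Dict K V) (k : K) (d0 : V),
    (∀ p ∈ P, p.1 ≠ k) →
    (P.foldl (fun d p => d.insert p.1 p.2) d).getD k d0 = d.getD k d0 := by
  intro P
  induction P with
  | nil => intro d k d0 _; rfl
  | cons p t ih =>
    intro d k d0 h
    rw [List.foldl_cons, ih _ _ _ (fun q hq => h q (List.mem_cons_of_mem _ hq))]
    exact PySem.Dict.getD_insert_of_ne d _ _ (fun he => h p (List.mem_cons_self) (he ▸ rfl))

lemma getD_foldl_ins_mem {K V : Type} [BEq K] [LawfulBEq K] :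
    ∀ (P : List (K × V)) (d : PySem.Dict K V) (k : K) (v : V) (d0 : V),
    (k, v) ∈ P → (P.map Prod.fst).Nodup →
    (P.foldl (fun d p => d.insert p.1 p.2) d).getD k d0 = v := by
  intro P
  induction P with
  | nil => intro _ _ _ _ h _; cases h
  | cons p t ih =>
    intro d k v d0 hmem hnd
    rw [List.map_cons, List.nodup_cons] at hnd
    rcases List.mem_cons.mp hmem with h | h
    · subst h
      rw [List.foldl_cons]
      rw [getD_foldl_ins_ne t _ _ _
        (fun q hq he => hnd.1 (by rw [← he]; exact List.mem_map.mpr ⟨q, hq, rfl⟩))]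
      exact PySem.Dict.getD_insert_self _ _ _ _
    · rw [List.foldl_cons]
      exact ih _ _ _ _ h hnd.2

lemma mem_enumerate_idxOf {A : Type} [DecidableEq A] (m : List A) (a : A) (ha : a ∈ m) :
    ((m.idxOf a : Int), a) ∈ PySem.List.enumerate m 0 := by
  rw [PySem.List.mem_enumerate_iff]
  refine ⟨m.idxOf a, List.idxOf_lt_length_of_mem ha, ?_⟩
  rw [List.getElem_idxOf]
  simp

-- B's table, written as a single fold over the key/value list tblL
lemma alt_eq (ciphertext key : String) :
    playfair_decrypt_alt ciphertext key
      = String.ofList ((digraphsB (PySem.Chars.replace (PySem.Chars.upper ciphertext.toList) ['J'] ['I'])).flatMap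
          (fun dgr => ((tblL (matrixB key)).foldl (fun d pr => d.insert pr.1 pr.2) PySem.Dict.empty).getD dgr [])) := by
  simp only [tblL, List.foldl_flatMap, List.foldl_map]
  rfl

lemma keys_tblL_nodup (m : List Char) (hnd : m.Nodup) : ((tblL m).map Prod.fst).Nodup := by
  have h : (tblL m).map Prod.fst = m.flatMap (fun a => m.map (fun b => (a, b))) := by
    simp only [tblL, List.map_flatMap, List.map_map]
    have h2 : ∀ (p : Int × Char),
        (PySem.List.enumerate m).map ((fun q => (p.2, q.2)))
          = m.map (fun b => (p.2, b)) := by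
      intro p
      rw [show (fun (q : Int × Char) => (p.2, q.2)) = (fun b => (p.2, b)) ∘ Prod.snd from rfl,
          ← List.map_map, PySem.List.map_snd_enumerate]
    calc (PySem.List.enumerate m).flatMap (fun p => (PySem.List.enumerate m).map (fun q => ((p.2, q.2))))
        = (PySem.List.enumerate m).flatMap (fun p => m.map (fun b => (p.2, b))) := by
          apply List.flatMap_congr; intro p _; exact h2 p
      _ = ((PySem.List.enumerate m).map Prod.snd).flatMap (fun a => m.map (fun b => (a, b))) := by
          rw [List.flatMap_map]
      _ = m.flatMap (fun a => m.map (fun b => (a, b))) := by rw [PySem.List.map_snd_enumerate]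
  rw [h]
  exact List.Nodup.product hnd hnd

lemma tbl_getD (m : List Char) (hnd : m.Nodup) (a b : Char) (ha : a ∈ m) (hb : b ∈ m) :
    ((tblL m).foldl (fun d pr => d.insert pr.1 pr.2) PySem.Dict.empty).getD (a, b) []
      = decR m (m.idxOf a : Int) (m.idxOf b : Int) := by
  apply getD_foldl_ins_mem _ _ _ _ _ ?_ (keys_tblL_nodup m hnd)
  rw [tblL]
  apply List.mem_flatMap.mpr
  exact ⟨((m.idxOf a : Int), a), mem_enumerate_idxOf m a ha,
    List.mem_map.mpr ⟨((m.idxOf b : Int), b), mem_enumerate_idxOf m b hb, rfl⟩⟩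

lemma mod_sub_one (x : Int) : PySem.Int.mod (x - 1) 5 = PySem.Int.mod (x + 4) 5 := by
  simp only [PySem.Int.mod_eq_emod_of_pos (show (0:Int) < 5 by norm_num)]
  omega

lemma idxOf?_of_mem (m : List Char) (a : Char) (h : a ∈ m) : List.idxOf? a m = some (m.idxOf a) := by
  induction m with
  | nil => cases h
  | cons x t ih =>
    by_cases hx : x = a
    · subst hx; simp [List.idxOf?_cons]
    · rcases List.mem_cons.mp h with h1 | h1
      · exact absurd h1.symm hx
      · simp [List.idxOf?_cons, hx, ih h1]

lemma index_eq_idxOf (m : List Char) (a : Char) (ha : a ∈ m) :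
    (PySem.List.index? m a).getD 0 = m.idxOf a := by
  rw [PySem.List.index?_eq_idxOf?, idxOf?_of_mem m a ha]
  rfl

lemma decA_eq_decR (m : List Char) (d : Char × Char) (h1 : d.1 ∈ m) (h2 : d.2 ∈ m) :
    decA m d = decR m (m.idxOf d.1 : Int) (m.idxOf d.2 : Int) := by
  simp only [decA, decR, index_eq_idxOf m _ h1, index_eq_idxOf m _ h2, mod_sub_one]

-- A's main loop builds the flatMap of decA
lemma foldA_flat (m : List Char) : ∀ (pre : List (Char × Char)) (acc : List Char),
    pre.foldl (fun acc d =>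
      let n1 : Int := ((PySem.List.index? m d.1).getD 0 : Nat)
      let n2 : Int := ((PySem.List.index? m d.2).getD 0 : Nat)
      let r1 := PySem.Int.floordiv n1 5; let c1 := PySem.Int.mod n1 5
      let r2 := PySem.Int.floordiv n2 5; let c2 := PySem.Int.mod n2 5
      if r1 = r2 then
        acc ++ [PySem.List.pyGetD m (r1 * 5 + PySem.Int.mod (c1 - 1) 5) 'A',
                PySem.List.pyGetD m (r2 * 5 + PySem.Int.mod (c2 - 1) 5) 'A']
      else if c1 = c2 then
        acc ++ [PySem.List.pyGetD m ((PySem.Int.mod (r1 - 1) 5) * 5 + c1) 'A',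
                PySem.List.pyGetD m ((PySem.Int.mod (r2 - 1) 5) * 5 + c2) 'A']
      else
        acc ++ [PySem.List.pyGetD m (r1 * 5 + c2) 'A',
                PySem.List.pyGetD m (r2 * 5 + c1) 'A']) acc
      = acc ++ pre.flatMap (decA m) := by
  have hbody : (fun (acc : List Char) (d : Char × Char) =>
      let n1 : Int := ((PySem.List.index? m d.1).getD 0 : Nat)
      let n2 : Int := ((PySem.List.index? m d.2).getD 0 : Nat)
      let r1 := PySem.Int.floordiv n1 5; let c1 := PySem.Int.mod n1 5
      let r2 := PySem.Int.floordiv n2 5; let c2 := PySem.Int.mod n2 5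
      if r1 = r2 then
        acc ++ [PySem.List.pyGetD m (r1 * 5 + PySem.Int.mod (c1 - 1) 5) 'A',
                PySem.List.pyGetD m (r2 * 5 + PySem.Int.mod (c2 - 1) 5) 'A']
      else if c1 = c2 then
        acc ++ [PySem.List.pyGetD m ((PySem.Int.mod (r1 - 1) 5) * 5 + c1) 'A',
                PySem.List.pyGetD m ((PySem.Int.mod (r2 - 1) 5) * 5 + c2) 'A']
      else
        acc ++ [PySem.List.pyGetD m (r1 * 5 + c2) 'A',
                PySem.List.pyGetD m (r2 * 5 + c1) 'A'])
      = fun acc d => acc ++ decA m d := by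
    funext acc d
    simp only [decA]
    split_ifs <;> rfl
  intro pre acc
  rw [hbody, PySem.List.foldl_append_eq_flatMap]

lemma digraphsB_eq_prepGo : ∀ (t : List Char), digraphsB t = prepGo t := by
  intro t
  induction t using prepGo.induct with
  | case1 => rfl
  | case2 => rfl
  | case3 a ha => rfl
  | case4 b rest ih => simp [digraphsB, prepGo, ih]
  | case5 a b rest hab ih => rw [digraphsB, prepGo, if_neg hab, if_neg hab, ih]

lemma prepGo_mem (S : List Char) (hX : 'X' ∈ S) :
    ∀ (t : List Char), (∀ c ∈ t, c ∈ S) → ∀ p ∈ prepGo t, p.1 ∈ S ∧ p.2 ∈ S := by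
  intro t
  induction t using prepGo.induct with
  | case1 => intro _ p hp; cases hp
  | case2 =>
    intro hs p hp
    rw [prepGo] at hp
    split_ifs at hp <;>
      (rw [List.mem_singleton.mp hp]; exact ⟨hs 'X' (by simp), hX⟩)
  | case3 a ha =>
    intro hs p hp
    rw [prepGo] at hp
    split_ifs at hp <;>
      (rw [List.mem_singleton.mp hp]; exact ⟨hs a (by simp), hX⟩)
  | case4 b rest ih =>
    intro hs p hp
    rw [prepGo, if_pos rfl] at hp
    rcases List.mem_cons.mp hp with h | h
    · rw [h]; exact ⟨hs b (by simp), hX⟩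
    · exact ih (fun c hc => hs c (List.mem_cons_of_mem _ hc)) p h
  | case5 a b rest hab ih =>
    intro hs p hp
    rw [prepGo, if_neg hab] at hp
    rcases List.mem_cons.mp hp with h | h
    · rw [h]; exact ⟨hs a (by simp), hs b (by simp)⟩
    · exact ih (fun c hc => hs c (List.mem_cons_of_mem _ (List.mem_cons_of_mem _ hc))) p h

lemma letter_fact : ∀ c ∈ "ABCDEFGHIJKLMNOPQRSTUVWXYZabcdefghijklmnopqrstuvwxyz".toList,
    ∀ x ∈ (if PySem.Chars.upperChar c = 'J' then ['I'] else [PySem.Chars.upperChar c]), x ∈ pfAL := by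
  have h : ("ABCDEFGHIJKLMNOPQRSTUVWXYZabcdefghijklmnopqrstuvwxyz".toList.all
      (fun c => (if PySem.Chars.upperChar c = 'J' then ['I'] else [PySem.Chars.upperChar c]).all
        (fun x => decide (x ∈ pfAL)))) = true := by decide
  rw [List.all_eq_true] at h
  intro c hc x hx
  have := h c hc
  rw [List.all_eq_true] at this
  simpa using this x hx

lemma pre_chars (ciphertext : String)
    (hpre : Pre_playfair_decrypt ciphertext "") :
    ∀ c ∈ PySem.Chars.replace (PySem.Chars.upper ciphertext.toList) ['J'] ['I'], c ∈ pfAL := by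
  rw [replace_single]
  intro c hc
  rcases List.mem_flatMap.mp hc with ⟨y, hy, hcy⟩
  rw [PySem.Chars.upper] at hy
  rcases List.mem_map.mp hy with ⟨x, hx, hyx⟩
  subst hyx
  rw [Pre_playfair_decrypt, List.all_eq_true] at hpre
  exact letter_fact x (by simpa using hpre x hx) c hcy

-- ===== VERDICT (by name: the statement is the Claim_ definition above) =====
theorem playfair_decrypt_spec : Claim_equal_playfair_decrypt := by
  intro ciphertext key _ hpre
  unfold Spec_playfair_decrypt
  have hm := matrix_eq key
  set m := matrixB key with hmB
  have hperm := matrix_perm key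
  have hnd : m.Nodup := hperm.nodup_iff.mpr (by decide)
  have hmem : ∀ c, c ∈ pfAL → c ∈ m := fun c hc => hperm.mem_iff.mpr hc
  have hchars := pre_chars ciphertext hpre
  have hdig := prepGo_mem m (hmem 'X' (by decide)) _
    (fun c hc => hmem c (hchars c hc))
  have hA : playfair_decrypt ciphertext key
      = String.ofList ((prepare_text ciphertext).flatMap (decA (create_playfair_matrix key))) := by
    have h := foldA_flat (create_playfair_matrix key) (prepare_text ciphertext) []
    rw [List.nil_append] at h
    exact congrArg String.ofList h
  rw [hA, alt_eq, digraphsB_eq_prepGo, hm, ← hmB]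
  apply congrArg String.ofList
  apply List.flatMap_congr
  intro d hd
  rw [decA_eq_decR m d (hdig d hd).1 (hdig d hd).2,
      tbl_getD m hnd d.1 d.2 (hdig d hd).1 (hdig d hd).2]
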